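-- pv_equiv track=rewrite | github.com/wlkaqw/python | 24年python考试7、8题.py | IsReplace
-- ===== SOURCE A (Python) =====
-- def IsReplace(lst1, lst2):
--     flag = 0
--     for i in range(len(lst1)):
--         if lst2[i] < lst1[i]:
--             break
--         if lst2[i] > lst1[i]:
--             flag = 1
--     else:
--         if flag == 1:
--             return True
--     return False
-- ===== SOURCE B (Python) =====
-- def IsReplace(lst1, lst2):
--     # two short-circuiting predicate passes instead of a flag/break/for-else loop
--     if not all(lst2[i] >= lst1[i] for i in range(len(lst1))):
--         return False
--     return any(lst2[i] > lst1[i] for i in range(len(lst1)))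
-- ===== Notes on version B (the rewrite author's own statement) =====
-- stated objective: simpler
-- what changed: Replaces the flag/break/for-else single loop with two short-circuiting predicate passes: an all() dominance check followed by an any() strictness check.
import Mathlib
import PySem

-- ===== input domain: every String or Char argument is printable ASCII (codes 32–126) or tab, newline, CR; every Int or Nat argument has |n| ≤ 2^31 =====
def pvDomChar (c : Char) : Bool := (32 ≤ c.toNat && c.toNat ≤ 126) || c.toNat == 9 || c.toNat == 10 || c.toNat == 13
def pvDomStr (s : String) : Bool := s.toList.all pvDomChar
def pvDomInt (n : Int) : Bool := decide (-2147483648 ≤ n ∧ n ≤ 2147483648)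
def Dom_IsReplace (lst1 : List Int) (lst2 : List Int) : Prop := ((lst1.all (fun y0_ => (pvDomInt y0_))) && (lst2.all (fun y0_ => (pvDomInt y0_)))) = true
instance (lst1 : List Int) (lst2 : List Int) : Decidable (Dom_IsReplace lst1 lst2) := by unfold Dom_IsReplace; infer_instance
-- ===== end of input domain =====

-- B replaces A's flag/break/for-else loop by two short-circuiting predicate passes (all-dominance then any-strict); objective: simpler.


-- ===== PORT A =====
-- the for-loop with break/flag/else, index i from 0 to len(lst1); lst2[i] read with getD 0
-- (exact inside Pre_, where the index is always in range — Python raises IndexError exactly outside Pre_)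
def IsReplaceGo (lst1 : List Int) (lst2 : List Int) (i : Nat) (flag : Int) : Bool :=
  if h : i < lst1.length then
    let a := lst1.getD i 0
    let b := lst2.getD i 0
    if b < a then false                         -- break → falls to final 'return False'
    else IsReplaceGo lst1 lst2 (i + 1) (if b > a then 1 else flag)
  else
    decide (flag = 1)                           -- for-else: return flag == 1
termination_by lst1.length - i

def IsReplace (lst1 : List Int) (lst2 : List Int) : Bool :=
  IsReplaceGo lst1 lst2 0 0

-- ===== PORT B =====
def IsReplace_alt (lst1 : List Int) (lst2 : List Int) : Bool :=
  if (List.range lst1.length).all (fun i => decide (lst2.getD i 0 ≥ lst1.getD i 0)) then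
    (List.range lst1.length).any (fun i => decide (lst2.getD i 0 > lst1.getD i 0))
  else false

-- ===== PRECONDITION & SPEC =====
-- Pre_ excludes exactly the inputs where Python A raises IndexError: lst2 shorter than lst1 while
-- lst2's whole length is dominated (so the loop never breaks before running off lst2's end).
def Pre_IsReplace (lst1 : List Int) (lst2 : List Int) : Prop :=
  ¬ (lst2.length < lst1.length ∧ ∀ i < lst2.length, lst1.getD i 0 ≤ lst2.getD i 0)
instance (lst1 : List Int) (lst2 : List Int) : Decidable (Pre_IsReplace lst1 lst2) := by unfold Pre_IsReplace; infer_instance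

def pvWitness_IsReplace : List Int × List Int := ([1, 2], [1, 3])

def Spec_IsReplace (lst1 : List Int) (lst2 : List Int) (out : Bool) : Prop := out = IsReplace_alt lst1 lst2
instance (lst1 : List Int) (lst2 : List Int) (out : Bool) : Decidable (Spec_IsReplace lst1 lst2 out) := by unfold Spec_IsReplace; infer_instance

-- ===== CLAIM (what is proved, stated in full; the proofs are below) =====
def Claim_equal_IsReplace : Prop := ∀ (lst1 : List Int) (lst2 : List Int), Dom_IsReplace lst1 lst2 → Pre_IsReplace lst1 lst2 → Spec_IsReplace lst1 lst2 (IsReplace lst1 lst2)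

-- ===== LEMMAS AND PROOFS =====

theorem IsReplaceGo_spec (lst1 lst2 : List Int) :
    ∀ (k i : Nat) (flag : Int), i + k = lst1.length →
    IsReplaceGo lst1 lst2 i flag =
      ((List.range' i k).all (fun j => decide (lst2.getD j 0 ≥ lst1.getD j 0)) &&
       ((List.range' i k).any (fun j => decide (lst2.getD j 0 > lst1.getD j 0)) || decide (flag = 1))) := by
  intro k
  induction k with
  | zero =>
    intro i flag h
    rw [IsReplaceGo]
    simp [show ¬ i < lst1.length by omega]
  | succ k ih =>
    intro i flag h
    rw [IsReplaceGo]
    have hi : i < lst1.length := by omega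
    simp only [hi, dif_pos, List.range'_succ, List.all_cons, List.any_cons]
    simp only [List.getD_eq_getElem?_getD] at *
    by_cases hba : lst2[i]?.getD 0 < lst1[i]?.getD 0
    · simp [hba, show ¬ (lst1[i]?.getD 0 ≤ lst2[i]?.getD 0) by omega]
    · simp only [ih (i + 1) _ (by omega), if_neg hba]
      by_cases hgt : lst1[i]?.getD 0 < lst2[i]?.getD 0
      · simp only [hgt, if_pos]
        simp [le_of_lt hgt]
      · simp only [if_neg hgt]
        simp [hgt, show lst1[i]?.getD 0 ≤ lst2[i]?.getD 0 by omega]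

-- ===== VERDICT (by name: the statement is the Claim_ definition above) =====
theorem IsReplace_spec : Claim_equal_IsReplace := by
  intro lst1 lst2 _ _
  unfold Spec_IsReplace IsReplace IsReplace_alt
  rw [IsReplaceGo_spec lst1 lst2 lst1.length 0 0 (by omega), List.range_eq_range']
  simp only [ge_iff_le, gt_iff_lt, List.getD_eq_getElem?_getD]
  cases h : (List.range' 0 lst1.length).all fun j => decide (lst1[j]?.getD 0 ≤ lst2[j]?.getD 0) <;> simp
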